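-- pv_equiv track=rewrite | github.com/eddiethedean/typra | scripts/extract_typra_core_unit_tests.py | skip_rust_string_or_raw
-- ===== SOURCE A (Python) =====
-- def skip_rust_string_or_raw(text: str, i: int) -> int | None:
--     """If position i starts a string or raw string, return index after its closing quote."""
--     if i >= len(text):
--         return None
--     # Raw string: r###" ... "###
--     if text[i] == "r":
--         j = i + 1
--         hashes = 0
--         while j < len(text) and text[j] == "#":
--             hashes += 1
--             j += 1
--         if j < len(text) and text[j] == '"':
--             j += 1
--             end_pat = '"' + ("#" * hashes)
--             k = text.find(end_pat, j)
--             if k == -1: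
--                 return None
--             return k + len(end_pat)
--     # Normal string
--     if text[i] == '"':
--         j = i + 1
--         esc = False
--         while j < len(text):
--             c = text[j]
--             if esc:
--                 esc = False
--             elif c == "\\":
--                 esc = True
--             elif c == '"':
--                 return j + 1
--             j += 1
--         return None
--     return None
-- ===== SOURCE B (Python) =====
-- def skip_rust_string_or_raw(text: str, i: int) -> int | None:
--     """If position i starts a string or raw string, return index after its closing quote."""
--     n = len(text)
--     if i >= n:
--         return None
--     c0 = text[i]
--     if c0 == "r":
--         j = i + 1
--         while j < n and text[j] == "#":
--             j += 1
--         if j < n and text[j] == '"':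
--             end_pat = '"' + "#" * (j - (i + 1))
--             k = text.find(end_pat, j + 1)
--             return None if k == -1 else k + len(end_pat)
--         return None
--     if c0 != '"':
--         return None
--     # Find-and-check: jump straight to each quote with str.find and test the
--     # parity of the backslash run before it, instead of walking char by char
--     # with an escape flag.
--     j = i + 1
--     while True:
--         k = text.find('"', j)
--         if k == -1:
--             return None
--         b = k
--         while b > 0 and text[b - 1] == "\\":
--             b -= 1
--         if (k - b) % 2 == 0:
--             return k + 1
--         j = k + 1
-- ===== Notes on version B (the rewrite author's own statement) =====
-- stated objective: idiomatic
-- what changed: The normal-string char-by-char escape-flag scan is replaced by jumping from quote to quote with str.find and accepting the first quote preceded by an even run of backslashes; the raw-string branch keeps its find-based shape with the hash counter recovered by subtraction.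
-- outside the precondition, e.g. on skip_rust_string_or_raw('"x"', -3): A returns 0, B returns 3; on skip_rust_string_or_raw('"x"', -9): A raises IndexError, B raises IndexError
import Mathlib
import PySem

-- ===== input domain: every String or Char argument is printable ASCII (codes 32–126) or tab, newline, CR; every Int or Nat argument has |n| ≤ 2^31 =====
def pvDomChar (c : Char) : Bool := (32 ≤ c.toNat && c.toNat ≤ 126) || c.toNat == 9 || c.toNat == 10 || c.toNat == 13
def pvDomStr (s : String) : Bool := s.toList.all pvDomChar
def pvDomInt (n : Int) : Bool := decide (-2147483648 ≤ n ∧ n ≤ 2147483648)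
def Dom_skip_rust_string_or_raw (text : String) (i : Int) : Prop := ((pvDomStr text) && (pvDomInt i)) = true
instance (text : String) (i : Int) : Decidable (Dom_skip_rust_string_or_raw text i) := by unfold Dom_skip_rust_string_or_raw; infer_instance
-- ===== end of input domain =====

-- B replaces A's char-by-char escape-flag scan of a normal string by jumping from quote
-- to quote with str.find and testing the parity of the backslash run before each (idiomatic
-- 'delegate the scan' style); equivalence is about the return value only (no mutation).

-- ===== PORT A =====
-- while j < len(text) and text[j] == "#": hashes += 1; j += 1   (returns (hashes, j))
def pvA_hashLoop (s : List Char) (n j hashes : Int) : Int × Int :=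
  if h : j < n ∧ PySem.List.pyGet? s j = some '#' then
    pvA_hashLoop s n (j + 1) (hashes + 1)
  else (hashes, j)
termination_by (n - j).toNat
decreasing_by omega

-- the normal-string while loop with the esc flag
def pvA_strLoop (s : List Char) (n j : Int) (esc : Bool) : Option Int :=
  if _h : j < n then
    match PySem.List.pyGet? s j with
    | none => none   -- unreachable for 0 ≤ j < n (text[j] cannot raise there)
    | some c =>
      if esc then pvA_strLoop s n (j + 1) false
      else if c = '\\' then pvA_strLoop s n (j + 1) true
      else if c = '"' then some (j + 1)
      else pvA_strLoop s n (j + 1) esc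
  else none
termination_by (n - j).toNat
decreasing_by all_goals omega

def skip_rust_string_or_raw (text : String) (i : Int) : Option Int :=
  let s := text.toList
  let n : Int := s.length
  if i ≥ n then none
  else if PySem.List.pyGet? s i = some 'r' then
    let p := pvA_hashLoop s n (i + 1) 0
    if p.2 < n ∧ PySem.List.pyGet? s p.2 = some '"' then
      let endPat : List Char := '"' :: List.replicate p.1.toNat '#'
      let k := PySem.Chars.findFrom s endPat (p.2 + 1)
      if k = -1 then none else some (k + (endPat.length : Int))
    else if PySem.List.pyGet? s i = some '"' then pvA_strLoop s n (i + 1) false else none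
  else if PySem.List.pyGet? s i = some '"' then pvA_strLoop s n (i + 1) false else none

-- ===== PORT B =====
-- while j < n and text[j] == "#": j += 1   (returns j; hashes recovered as j - (i+1))
def pvB_hashLoop (s : List Char) (n j : Int) : Int :=
  if h : j < n ∧ PySem.List.pyGet? s j = some '#' then pvB_hashLoop s n (j + 1) else j
termination_by (n - j).toNat
decreasing_by omega

-- b = k; while b > 0 and text[b-1] == '\\': b -= 1
def pvB_bsLoop (s : List Char) (b : Int) : Int :=
  if h : 0 < b ∧ PySem.List.pyGet? s (b - 1) = some '\\' then pvB_bsLoop s (b - 1) else b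
termination_by b.toNat
decreasing_by omega

-- while True: k = text.find('"', j); …
def pvB_quoteLoop (s : List Char) (n j : Int) : Option Int :=
  let k := PySem.Chars.findFrom s ['"'] j
  if k = -1 then none
  else if PySem.Int.mod (k - pvB_bsLoop s k) 2 = 0 then some (k + 1)
  -- totality guard only: find always returns j ≤ k < n here (proved below); Python needs no check
  else if h : j ≤ k ∧ k < n then pvB_quoteLoop s n (k + 1) else none
termination_by (n - j).toNat
decreasing_by omega

def skip_rust_string_or_raw_alt (text : String) (i : Int) : Option Int :=
  let s := text.toList
  let n : Int := s.length
  if i ≥ n then none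
  else match PySem.List.pyGet? s i with
  | none => none   -- unreachable for 0 ≤ i < n
  | some c0 =>
    if c0 = 'r' then
      let j := pvB_hashLoop s n (i + 1)
      if j < n ∧ PySem.List.pyGet? s j = some '"' then
        let endPat : List Char := '"' :: List.replicate (j - (i + 1)).toNat '#'
        let k := PySem.Chars.findFrom s endPat (j + 1)
        if k = -1 then none else some (k + (endPat.length : Int))
      else none
    else if c0 = '"' then pvB_quoteLoop s n (i + 1)
    else none

-- ===== PRECONDITION & SPEC =====
-- Pre_ excludes negative positions i: for i < -len(text) A raises IndexError, and for
-- -len(text) ≤ i < 0 A's result comes from Python's accidental negative-index wraparound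
-- mixed with non-negative loop indices, yielding meaningless indices (see cites).
def Pre_skip_rust_string_or_raw (text : String) (i : Int) : Prop := 0 ≤ i
instance (text : String) (i : Int) : Decidable (Pre_skip_rust_string_or_raw text i) := by unfold Pre_skip_rust_string_or_raw; infer_instance
def pvWitness_skip_rust_string_or_raw : String × Int := ("\"a\\\"b\"", 0)
def Spec_skip_rust_string_or_raw (text : String) (i : Int) (out : Option Int) : Prop := out = skip_rust_string_or_raw_alt text i
instance (text : String) (i : Int) (out : Option Int) : Decidable (Spec_skip_rust_string_or_raw text i out) := by unfold Spec_skip_rust_string_or_raw; infer_instance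

-- ===== CLAIM (what is proved, stated in full; the proofs are below) =====
def Claim_equal_skip_rust_string_or_raw : Prop := ∀ (text : String) (i : Int), Dom_skip_rust_string_or_raw text i → Pre_skip_rust_string_or_raw text i → Spec_skip_rust_string_or_raw text i (skip_rust_string_or_raw text i)

-- ===== LEMMAS AND PROOFS =====

theorem hashLoop_eq (s : List Char) (n : Int) : ∀ (j c : Int),
    pvA_hashLoop s n j c = (c + (pvB_hashLoop s n j - j), pvB_hashLoop s n j) := by
  intro j c
  fun_induction pvB_hashLoop s n j generalizing c with
  | case1 j h ih =>
    rw [pvA_hashLoop, dif_pos h, ih]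
    ring_nf
  | case2 j h =>
    rw [pvA_hashLoop, dif_neg h]
    simp

def pvEsc (esc : Bool) (seg : List Char) : Bool :=
  seg.foldl (fun e c => if e then false else c = '\\') esc

def pvTBS (seg : List Char) : Nat := (seg.reverse.takeWhile (· = '\\')).length

theorem prefix_getElem? {l₁ l₂ : List Char} (hp : l₁ <+: l₂) {t : Nat} (h : t < l₁.length) :
    l₂[t]? = l₁[t]? := by
  obtain ⟨r, rfl⟩ := hp
  rw [List.getElem?_append_left h]

theorem takeWhile_maximal (p : Char → Bool) : ∀ (l : List Char),
    (l.takeWhile p).length < l.length → ∀ c, l[(l.takeWhile p).length]? = some c → p c = false := by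
  intro l
  induction l with
  | nil => intro h; simp at h
  | cons a l ih =>
    intro h c hc
    by_cases hpa : p a = true
    · have ht : (a :: l).takeWhile p = a :: l.takeWhile p := by simp [hpa]
      rw [ht] at h hc
      simp only [List.length_cons, List.getElem?_cons_succ] at h hc
      exact ih (by omega) c hc
    · have hpa' : p a = false := by simpa using hpa
      have ht : (a :: l).takeWhile p = [] := by simp [hpa']
      rw [ht] at hc
      simp at hc
      rw [← hc]; exact hpa'

-- elements of the trailing backslash run
theorem pvTBS_mem (seg : List Char) : ∀ t < pvTBS seg, seg[seg.length - 1 - t]? = some '\\' := by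
  intro t ht
  have hlt : t < seg.reverse.length := lt_of_lt_of_le ht (by simpa [pvTBS] using (List.takeWhile_prefix (l := seg.reverse) (· = '\\')).length_le)
  have hrev : seg.reverse[t]? = (seg.reverse.takeWhile (· = '\\'))[t]? :=
    prefix_getElem? (List.takeWhile_prefix _) ht
  have hmem : (seg.reverse.takeWhile (· = '\\'))[t]'ht ∈ seg.reverse.takeWhile (· = '\\') :=
    List.getElem_mem ht
  have hval : (seg.reverse.takeWhile (· = '\\'))[t]'ht = '\\' := by
    simpa using List.mem_takeWhile_imp hmem
  rw [← List.getElem?_reverse (by simpa using hlt), hrev, List.getElem?_eq_getElem ht, hval]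

theorem pvTBS_stop (seg : List Char) (h : pvTBS seg < seg.length) :
    ∀ c, seg[seg.length - 1 - pvTBS seg]? = some c → c ≠ '\\' := by
  intro c hc
  have hlt : pvTBS seg < seg.reverse.length := by simpa using h
  rw [← List.getElem?_reverse (by simpa using hlt)] at hc
  have := takeWhile_maximal (· = '\\') seg.reverse hlt c hc
  simpa using this

theorem pvEsc_parity (seg : List Char) : pvEsc false seg = decide (pvTBS seg % 2 = 1) := by
  induction seg using List.reverseRecOn with
  | nil => simp [pvEsc, pvTBS]
  | append_singleton xs c ih =>
    by_cases hc : c = '\\'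
    · subst hc
      have h1 : pvEsc false (xs ++ ['\\']) = !(pvEsc false xs) := by
        simp [pvEsc, List.foldl_append]
      have h2 : pvTBS (xs ++ ['\\']) = pvTBS xs + 1 := by
        simp [pvTBS]
      rw [h1, h2, ih]
      rcases Nat.mod_two_eq_zero_or_one (pvTBS xs) with h | h <;> simp [h, Nat.add_mod]
    · have h1 : pvEsc false (xs ++ [c]) = false := by
        simp [pvEsc, List.foldl_append, hc]
      have h2 : pvTBS (xs ++ [c]) = 0 := by
        simp [pvTBS, hc]
      rw [h1, h2]
      simp

theorem strLoop_step (s : List Char) (j : Nat) (hj : j < s.length) (esc : Bool) :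
    pvA_strLoop s s.length (j : Int) esc =
      if esc then pvA_strLoop s s.length ((j + 1 : Nat) : Int) false
      else if s[j] = '\\' then pvA_strLoop s s.length ((j + 1 : Nat) : Int) true
      else if s[j] = '"' then some ((j : Int) + 1)
      else pvA_strLoop s s.length ((j + 1 : Nat) : Int) esc := by
  rw [pvA_strLoop]
  rw [dif_pos (by exact_mod_cast hj)]
  rw [PySem.List.pyGet?_natCast, List.getElem?_eq_getElem hj]
  push_cast
  rfl

theorem strLoop_none (s : List Char) : ∀ (m j : Nat) (esc : Bool), s.length - j ≤ m →
    '"' ∉ s.drop j → pvA_strLoop s s.length (j : Int) esc = none := by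
  intro m
  induction m with
  | zero =>
    intro j esc hm _
    rw [pvA_strLoop, dif_neg (by omega : ¬ ((j:Int) < (s.length:Int)))]
  | succ m ih =>
    intro j esc hm hq
    by_cases hj : j < s.length
    · have hq1 : '"' ∉ s.drop (j + 1) := by
        intro hmem; exact hq (by simpa using List.mem_of_mem_drop (by simpa using hmem : '"' ∈ (s.drop j).drop 1))
      have hgj : s[j] ≠ '"' := by
        intro he
        have h0 : (s.drop j)[0]? = some '"' := by
          rw [List.getElem?_drop]; simpa [he] using List.getElem?_eq_getElem hj
        exact hq (List.mem_of_getElem? h0)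
      rw [strLoop_step s j hj]
      have hrec : ∀ e, pvA_strLoop s s.length ((j + 1 : Nat) : Int) e = none :=
        fun e => ih (j + 1) e (by omega) hq1
      split_ifs <;> exact hrec _
    · rw [pvA_strLoop, dif_neg (by omega : ¬ ((j:Int) < (s.length:Int)))]

theorem drop_head (s : List Char) (j : Nat) (c : Char) (l : List Char)
    (h : s.drop j = c :: l) : j < s.length ∧ s[j]? = some c ∧ s.drop (j+1) = l := by
  have hlen : j < s.length := by
    by_contra hn
    rw [List.drop_eq_nil_of_le (by omega)] at h; exact (List.cons_ne_nil _ _) h.symm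
  have h0 : s[j]? = some c := by
    have := congrArg (fun t => t[0]?) h
    simpa [List.getElem?_drop] using this
  refine ⟨hlen, h0, ?_⟩
  have := congrArg (List.drop 1) h
  simpa [List.drop_drop, Nat.add_comm] using this

theorem strLoop_seg (s : List Char) : ∀ (seg : List Char) (j : Nat) (esc : Bool)
    (rest : List Char), s.drop j = seg ++ '"' :: rest → '"' ∉ seg →
    pvA_strLoop s s.length (j : Int) esc =
      if pvEsc esc seg then pvA_strLoop s s.length ((j + seg.length + 1 : Nat) : Int) false
      else some (((j + seg.length : Nat) : Int) + 1) := by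
  intro seg
  induction seg with
  | nil =>
    intro j esc rest hdrop _
    obtain ⟨hj, hget, -⟩ := drop_head s j '"' rest (by simpa using hdrop)
    have hjq : s[j] = '"' := by
      have := List.getElem?_eq_getElem hj; rw [hget] at this; exact (Option.some_injective _ this.symm)
    rw [strLoop_step s j hj]
    cases esc with
    | true => simp [pvEsc]
    | false => simp [pvEsc, hjq]
  | cons c seg ih =>
    intro j esc rest hdrop hq
    obtain ⟨hj, hget, hdrop1⟩ := drop_head s j c _ (by simpa using hdrop)
    have hjc : s[j] = c := by
      have := List.getElem?_eq_getElem hj; rw [hget] at this; exact (Option.some_injective _ this.symm)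
    have hcq : c ≠ '"' := fun he => hq (by simp [he])
    have hq' : '"' ∉ seg := fun hm => hq (List.mem_cons_of_mem _ hm)
    have harith : (j + 1) + seg.length = j + (c :: seg).length := by simp; omega
    rw [strLoop_step s j hj]
    cases esc with
    | true =>
      rw [ih (j+1) false rest hdrop1 hq', harith]
      simp [pvEsc]
    | false =>
      by_cases hcb : c = '\\'
      · rw [if_neg (by simp), if_pos (by rw [hjc, hcb]), ih (j+1) true rest hdrop1 hq', harith]
        simp [pvEsc, hcb]
      · rw [if_neg (by simp), if_neg (by rw [hjc]; exact fun h => hcb h), if_neg (by rw [hjc]; exact hcq),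
           ih (j+1) false rest hdrop1 hq', harith]
        simp [pvEsc, hcb]

theorem bsLoop_eq (s : List Char) : ∀ (r k : Nat), r ≤ k →
    (∀ t < r, s[k - 1 - t]? = some '\\') →
    (k - r = 0 ∨ ∀ c, s[k - r - 1]? = some c → c ≠ '\\') →
    pvB_bsLoop s (k : Int) = ((k - r : Nat) : Int) := by
  intro r
  induction r with
  | zero =>
    intro k _ _ hstop
    rw [pvB_bsLoop]
    rcases hstop with h0 | hne
    · rw [dif_neg (by rintro ⟨hk, -⟩; omega)]; omega
    · rw [dif_neg ?_]
      · simp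
      rintro ⟨hk, hget⟩
      have : ((k:Int) - 1) = ((k - 1 : Nat) : Int) := by omega
      rw [this, PySem.List.pyGet?_natCast] at hget
      exact hne _ (by simpa using hget) rfl
  | succ r ih =>
    intro k hr hall hstop
    have hk : 0 < k := by omega
    rw [pvB_bsLoop, dif_pos ?_]
    · have : ((k:Int) - 1) = ((k - 1 : Nat) : Int) := by omega
      rw [this, ih (k-1) (by omega) (fun t ht => by
          have := hall (t+1) (by omega)
          convert this using 2
          omega)
        (by rcases hstop with h0 | hne
            · left; omega
            · right; intro c hget; exact hne c (by convert hget using 2; omega))]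
      congr 1
      omega
    · refine ⟨by omega, ?_⟩
      have : ((k:Int) - 1) = ((k - 1 : Nat) : Int) := by omega
      rw [this, PySem.List.pyGet?_natCast]
      have := hall 0 (by omega)
      simpa using this

theorem quoteLoop_eq (s : List Char) : ∀ (m j : Nat), s.length - j ≤ m → j ≤ s.length →
    (j = 0 ∨ ∀ c, s[j - 1]? = some c → c ≠ '\\') →
    pvB_quoteLoop s s.length (j : Int) = pvA_strLoop s s.length (j : Int) false := by
  intro m
  induction m with
  | zero =>
    intro j hm hj _
    have hj' : j = s.length := by omega
    have hfind : PySem.Chars.findFrom s ['"'] (j : Int) = -1 := by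
      rw [PySem.Chars.findFrom_natCast_eq_neg_one_iff s _ j hj]
      subst hj'; simp
    rw [pvA_strLoop, dif_neg (by omega : ¬ ((j:Int) < (s.length:Int))), pvB_quoteLoop]
    simp [hfind]
  | succ m ih =>
    intro j hm hj hinv
    by_cases hfind : PySem.Chars.findFrom s ['"'] (j : Int) = -1
    · have hq : '"' ∉ s.drop j := by
        have := (PySem.Chars.findFrom_natCast_eq_neg_one_iff s ['"'] j hj).mp hfind
        intro hmem; exact this ((List.singleton_infix_iff _ _).mpr hmem)
      rw [strLoop_none s s.length j false (by omega) hq, pvB_quoteLoop]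
      simp [hfind]
    · obtain ⟨hk1, hpre, hmin⟩ := PySem.Chars.findFrom_natCast_spec s ['"'] j hj hfind
      set k' := PySem.Chars.findFrom s ['"'] (j : Int) with hk'
      have hk0 : (0:Int) ≤ k' := le_trans (by omega) hk1
      set k : Nat := k'.toNat with hkdef
      have hkcast : k' = (k : Int) := by omega
      have hjk : j ≤ k := by omega
      obtain ⟨t, ht⟩ := hpre
      have ht' : s.drop k = '"' :: t := by simpa using ht.symm
      obtain ⟨hklen, hkget, hdropk1⟩ := drop_head s k '"' t ht'
      -- the quote-free segment between j and k
      set seg : List Char := (s.drop j).take (k - j) with hsegdef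
      have hseglen : seg.length = k - j := by
        simp [hsegdef]; omega
      have hsplit : s.drop j = seg ++ '"' :: s.drop (k + 1) := by
        rw [hsegdef, hdropk1]
        conv_lhs => rw [← List.take_append_drop (k - j) (s.drop j)]
        congr 1
        rw [List.drop_drop, show j + (k - j) = k by omega, ht']
      have hsegget : ∀ u, u < k - j → seg[u]? = s[j + u]? := by
        intro u hu
        rw [hsegdef, List.getElem?_take_of_lt hu, List.getElem?_drop]
      have hqseg : '"' ∉ seg := by
        intro hmem
        obtain ⟨u, hu, hgu⟩ := List.getElem_of_mem hmem
        have hu' : u < k - j := by omega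
        have hsu : s[j + u]? = some '"' := by
          rw [← hsegget u hu', List.getElem?_eq_getElem hu, hgu]
        have hjulen : j + u < s.length := (List.getElem?_eq_some_iff.mp hsu).1
        refine hmin (j + u) (by omega) (by omega) ⟨s.drop (j + u + 1), ?_⟩
        have hd : s.drop (j + u) = '"' :: s.drop (j + u + 1) := by
          rw [List.drop_eq_getElem_cons hjulen]
          congr 1
          have h2 := List.getElem?_eq_getElem hjulen
          rw [hsu] at h2
          exact (Option.some_injective _ h2.symm)
        simpa using hd.symm
      -- A's loop across the segment
      have hA := strLoop_seg s seg j false (s.drop (k+1)) hsplit hqseg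
      rw [hseglen, show j + (k - j) = k by omega] at hA
      -- B's backslash run
      set r : Nat := pvTBS seg with hrdef
      have hrle : r ≤ k - j := by
        have : r ≤ seg.length := by
          simpa [pvTBS, hrdef] using
            (List.takeWhile_prefix (l := seg.reverse) (· = '\\')).length_le
        omega
      have hmem : ∀ t < r, s[k - 1 - t]? = some '\\' := by
        intro t ht
        have := pvTBS_mem seg t ht
        rw [hseglen] at this
        rw [hsegget (k - j - 1 - t) (by omega)] at this
        rw [← this]
        congr 1
        omega
      have hstop : k - r = 0 ∨ ∀ c, s[k - r - 1]? = some c → c ≠ '\\' := by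
        by_cases hr : r < k - j
        · right
          intro c hc
          have hstop' := pvTBS_stop seg (by omega)
          rw [hseglen, ← hrdef] at hstop'
          refine hstop' c ?_
          rw [hsegget (k - j - 1 - r) (by omega), ← hc]
          congr 1
          omega
        · have hreq : k - r = j := by omega
          rcases hinv with h0 | hne
          · left; omega
          · right
            intro c hc
            refine hne c ?_
            rw [← hc]
            congr 1
            omega
      have hbs : pvB_bsLoop s (k : Int) = ((k - r : Nat) : Int) :=
        bsLoop_eq s r k (by omega) hmem hstop
      -- unfold B once
      rw [pvB_quoteLoop]
      simp only [← hk']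
      rw [if_neg hfind, hkcast, hbs]
      have hsub : (k : Int) - ((k - r : Nat) : Int) = (r : Int) := by omega
      rw [hsub, PySem.Int.mod_eq_emod_of_pos (by norm_num)]
      rw [pvEsc_parity, ← hrdef] at hA
      rcases Nat.mod_two_eq_zero_or_one r with hpar | hpar
      · rw [if_pos (by omega : (r : Int) % 2 = 0)]
        rw [hA, if_neg (by simp [hpar])]
      · rw [if_neg (by omega : ¬ ((r : Int) % 2 = 0))]
        rw [dif_pos ⟨by omega, by exact_mod_cast hklen⟩]
        rw [hA, if_pos (by simp [hpar])]
        have hcast : (k : Int) + 1 = ((k + 1 : Nat) : Int) := by omega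
        rw [hcast]
        refine ih (k + 1) (by omega) (by omega) (Or.inr ?_)
        intro c hc
        have hck : c = '"' := by
          have h2 : s[k]? = some c := by simpa using hc
          rw [hkget] at h2
          exact (Option.some_injective _ h2.symm)
        simp [hck]

-- ===== VERDICT (by name: the statement is the Claim_ definition above) =====
theorem skip_rust_string_or_raw_spec : Claim_equal_skip_rust_string_or_raw := by
  intro text i _ hpre
  unfold Spec_skip_rust_string_or_raw
  simp only [skip_rust_string_or_raw, skip_rust_string_or_raw_alt]
  set s := text.toList with hs
  by_cases hge : i ≥ ((s.length : Int))
  · rw [if_pos hge, if_pos hge]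
  · rw [if_neg hge, if_neg hge]
    have hpre' : (0:Int) ≤ i := hpre
    have hi : i = ((i.toNat : Nat) : Int) := by omega
    set m : Nat := i.toNat with hm
    have hmlt : m < s.length := by omega
    have hget : PySem.List.pyGet? s i = some (s[m]'hmlt) := by
      rw [hi, PySem.List.pyGet?_natCast, List.getElem?_eq_getElem hmlt]
    rw [hget]
    by_cases hr : s[m]'hmlt = 'r'
    · rw [if_pos (by rw [hr]), hashLoop_eq]
      simp only [hr, zero_add]
      simp
    · rw [if_neg (by simpa using hr)]
      simp only [if_neg hr]
      by_cases hq : s[m]'hmlt = '"'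
      · rw [if_pos (by rw [hq]), if_pos (by simpa using hq)]
        have hcast : i + 1 = (((m + 1 : Nat)) : Int) := by omega
        rw [hcast]
        exact (quoteLoop_eq s s.length (m + 1) (by omega) (by omega)
          (Or.inr (fun c hc => by
            have h2 : s[m]? = some c := by simpa using hc
            rw [List.getElem?_eq_getElem hmlt] at h2
            have : c = s[m]'hmlt := (Option.some_injective _ h2).symm
            rw [this, hq]
            decide))).symm
      · rw [if_neg (by simpa using hq), if_neg (by simpa using hq)]
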